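-- pv_equiv track=rewrite | github.com/jk-jung/problem-solving | codewars/6kyu/6_T.T.T.17: Split odd and even.py | split_odd_and_even
-- ===== SOURCE A (Python) =====
-- def split_odd_and_even(n):
--     r = []
--     for x in str(n):
--         if not r or int(r[-1]) % 2 != int(x) % 2:
--             r.append(x)
--         else:
--             r[-1] += x
--     return list(map(int, r))
-- ===== SOURCE B (Python) =====
-- def split_odd_and_even(n):
--     s = str(n)
--     out = []
--     i = 0
--     while i < len(s):
--         j = i + 1
--         while j < len(s) and int(s[j]) % 2 == int(s[i]) % 2:
--             j += 1
--         out.append(int(s[i:j]))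
--         i = j
--     return out
-- ===== Notes on version B (the rewrite author's own statement) =====
-- stated objective: alternative
-- what changed: replaces A's single fold that appends to / mutates the last run held in the result list by a two-pointer scan over str(n) that finds each maximal same-parity run [i, j) with an inner scan and slices it out directly
import Mathlib
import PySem

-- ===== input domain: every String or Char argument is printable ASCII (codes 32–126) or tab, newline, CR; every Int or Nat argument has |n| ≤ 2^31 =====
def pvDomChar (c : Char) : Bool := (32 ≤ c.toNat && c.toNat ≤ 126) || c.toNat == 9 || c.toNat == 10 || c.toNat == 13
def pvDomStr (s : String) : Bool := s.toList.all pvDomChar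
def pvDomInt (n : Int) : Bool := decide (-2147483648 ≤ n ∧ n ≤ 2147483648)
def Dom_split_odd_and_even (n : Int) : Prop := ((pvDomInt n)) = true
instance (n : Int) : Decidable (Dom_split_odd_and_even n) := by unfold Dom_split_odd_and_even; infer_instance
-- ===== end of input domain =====

-- B replaces A's fold that appends to / mutates the last run of the result list by a
-- two-pointer scan finding each maximal same-parity digit run [i, j) and slicing it out
-- (objective: alternative; same O(number of digits) cost).

-- Shared helper: Python's int() hand-ported for the values it is applied to here.
-- Exact for Python's int() on nonempty all-digit (0-9) strings — the only strings either
-- program feeds to int() on inputs admitted by Pre_; elsewhere Python raises ValueError.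
def pyIntDigits (cs : List Char) : Int :=
  cs.foldl (fun a c => 10 * a + ((c.toNat : Int) - 48)) 0

-- ===== PORT A =====
-- state r is kept reversed: the list head is Python's r[-1] (append/mutate-at-end site)
def splitStep (r : List (List Char)) (x : Char) : List (List Char) :=
  match r with
  | [] => [[x]]
  | last :: rest =>
      if PySem.Int.mod (pyIntDigits last) 2 ≠ PySem.Int.mod (pyIntDigits [x]) 2 then
        [x] :: last :: rest
      else (last ++ [x]) :: rest

def split_odd_and_even (n : Int) : List Int :=
  (((PySem.Int.toChars n).foldl splitStep []).reverse).map pyIntDigits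

-- ===== PORT B =====
-- inner while loop of Source B: advance j while int(s[j]) % 2 == p
def altScan (cs : List Char) (p : Int) (j : Nat) : Nat :=
  if h : j < cs.length then
    if PySem.Int.mod (pyIntDigits [cs[j]]) 2 = p then altScan cs p (j + 1) else j
  else j
  termination_by cs.length - j

theorem le_altScan (cs : List Char) (p : Int) (j : Nat) : j ≤ altScan cs p j := by
  fun_induction altScan with
  | case1 j h hp ih => exact Nat.le_trans (Nat.le_succ j) ih
  | case2 j h hp => exact Nat.le_refl j
  | case3 j h => exact Nat.le_refl j

-- outer while loop of Source B: emit int(s[i:j]) for each run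
def altBuild (cs : List Char) (i : Nat) : List Int :=
  if h : i < cs.length then
    let j := altScan cs (PySem.Int.mod (pyIntDigits [cs[i]]) 2) (i + 1)
    pyIntDigits (PySem.List.slice cs (some (i : Int)) (some (j : Int))) :: altBuild cs j
  else []
  termination_by cs.length - i
  decreasing_by
    have := le_altScan cs (PySem.Int.mod (pyIntDigits [cs[i]]) 2) (i + 1)
    omega

def split_odd_and_even_alt (n : Int) : List Int :=
  altBuild (PySem.Int.toChars n) 0

-- ===== PRECONDITION & SPEC =====
-- Pre_: exactly the inputs on which Python A returns. For negative n, str(n) starts with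
-- '-' and A's int(r[-1]) raises ValueError on the second loop iteration (B raises there too).
def Pre_split_odd_and_even (n : Int) : Prop := 0 ≤ n
instance (n : Int) : Decidable (Pre_split_odd_and_even n) := by unfold Pre_split_odd_and_even; infer_instance
def pvWitness_split_odd_and_even : Int := 1234507

def Spec_split_odd_and_even (n : Int) (out : List Int) : Prop := out = split_odd_and_even_alt n
instance (n : Int) (out : List Int) : Decidable (Spec_split_odd_and_even n out) := by unfold Spec_split_odd_and_even; infer_instance

-- ===== CLAIM (what is proved, stated in full; the proofs are below) =====
def Claim_equal_split_odd_and_even : Prop := ∀ (n : Int), Dom_split_odd_and_even n → Pre_split_odd_and_even n → Spec_split_odd_and_even n (split_odd_and_even n)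

-- ===== LEMMAS AND PROOFS =====

-- parity of a digit string read by pyIntDigits is the parity of its last character
theorem mod_pyIntDigits_append (s : List Char) (c : Char) :
    PySem.Int.mod (pyIntDigits (s ++ [c])) 2 = PySem.Int.mod (pyIntDigits [c]) 2 := by
  have h1 : pyIntDigits (s ++ [c]) = 10 * pyIntDigits s + ((c.toNat : Int) - 48) := by
    simp [pyIntDigits, List.foldl_append]
  have h2 : pyIntDigits [c] = ((c.toNat : Int) - 48) := by simp [pyIntDigits]
  rw [h1, h2, PySem.Int.mod_eq_emod_of_pos (show (0:Int) < 2 by omega), PySem.Int.mod_eq_emod_of_pos (show (0:Int) < 2 by omega)]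
  omega

-- the maximal same-parity runs of a character list (reference decomposition)
def runsOf (cs : List Char) : List (List Char) :=
  match cs with
  | [] => []
  | c :: t =>
      (c :: t.takeWhile (fun d => PySem.Int.mod (pyIntDigits [d]) 2 = PySem.Int.mod (pyIntDigits [c]) 2))
        :: runsOf (t.dropWhile (fun d => PySem.Int.mod (pyIntDigits [d]) 2 = PySem.Int.mod (pyIntDigits [c]) 2))
  termination_by cs.length
  decreasing_by
    exact Nat.lt_succ_of_le (List.length_dropWhile_le _ _)

theorem take_len_takeWhile {α : Type} (p : α → Bool) (l : List α) :
    l.take (l.takeWhile p).length = l.takeWhile p := by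
  induction l with
  | nil => rfl
  | cons x t ih =>
    by_cases hx : p x
    · simp [List.takeWhile_cons, hx, ih]
    · simp [List.takeWhile_cons, hx]

theorem drop_len_takeWhile {α : Type} (p : α → Bool) (l : List α) :
    l.drop (l.takeWhile p).length = l.dropWhile p := by
  induction l with
  | nil => rfl
  | cons x t ih =>
    by_cases hx : p x
    · simp [List.takeWhile_cons, List.dropWhile_cons, hx, ih]
    · simp [List.takeWhile_cons, List.dropWhile_cons, hx]

-- A's fold with a nonempty state produces: the pending run extended by the matching
-- prefix, then the runs of the rest
theorem coreA (cs : List Char) : ∀ (last : List Char) (acc : List (List Char)),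
    (cs.foldl splitStep (last :: acc)).reverse
      = acc.reverse ++
        ((last ++ cs.takeWhile (fun d => PySem.Int.mod (pyIntDigits [d]) 2 = PySem.Int.mod (pyIntDigits last) 2))
          :: runsOf (cs.dropWhile (fun d => PySem.Int.mod (pyIntDigits [d]) 2 = PySem.Int.mod (pyIntDigits last) 2))) := by
  induction cs with
  | nil => intro last acc; simp [runsOf]
  | cons c t ih =>
    intro last acc
    by_cases hpar : PySem.Int.mod (pyIntDigits last) 2 = PySem.Int.mod (pyIntDigits [c]) 2
    · -- same parity: Python extends r[-1]
      have hstep : splitStep (last :: acc) c = (last ++ [c]) :: acc := by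
        rw [show splitStep (last :: acc) c = if PySem.Int.mod (pyIntDigits last) 2 ≠ PySem.Int.mod (pyIntDigits [c]) 2 then [c] :: last :: acc else (last ++ [c]) :: acc from rfl]
        rw [if_neg (not_not_intro hpar)]
      have h2 : (0:Int) < 2 := by omega
      have hpar' : pyIntDigits last % 2 = pyIntDigits [c] % 2 := by
        rw [PySem.Int.mod_eq_emod_of_pos h2, PySem.Int.mod_eq_emod_of_pos h2] at hpar; exact hpar
      have hkey' : pyIntDigits (last ++ [c]) % 2 = pyIntDigits [c] % 2 := by
        have hk := mod_pyIntDigits_append last c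
        rw [PySem.Int.mod_eq_emod_of_pos h2, PySem.Int.mod_eq_emod_of_pos h2] at hk; exact hk
      rw [List.foldl_cons, hstep, ih (last ++ [c]) acc]
      simp [List.takeWhile_cons, List.dropWhile_cons, hpar', hkey', List.append_assoc]
    · -- parity differs: Python appends a new run
      have hstep : splitStep (last :: acc) c = [c] :: last :: acc := by
        rw [show splitStep (last :: acc) c = if PySem.Int.mod (pyIntDigits last) 2 ≠ PySem.Int.mod (pyIntDigits [c]) 2 then [c] :: last :: acc else (last ++ [c]) :: acc from rfl]
        rw [if_pos hpar]
      rw [List.foldl_cons, hstep, ih [c] (last :: acc)]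
      have h2 : (0:Int) < 2 := by omega
      have hne' : ¬ (pyIntDigits [c] % 2 = pyIntDigits last % 2) := by
        rw [PySem.Int.mod_eq_emod_of_pos h2, PySem.Int.mod_eq_emod_of_pos h2] at hpar
        exact fun h => hpar h.symm
      simp [List.takeWhile_cons, List.dropWhile_cons, hne', runsOf]

theorem mainA (cs : List Char) : (cs.foldl splitStep []).reverse = runsOf cs := by
  cases cs with
  | nil => simp [runsOf]
  | cons c t =>
    have h0 : splitStep [] c = [[c]] := rfl
    rw [List.foldl_cons, h0, coreA t [c] []]
    simp [runsOf]

theorem ascan (cs : List Char) (p : Int) : ∀ (j : Nat),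
    altScan cs p j = j + ((cs.drop j).takeWhile (fun d => PySem.Int.mod (pyIntDigits [d]) 2 = p)).length := by
  intro j
  fun_induction altScan with
  | case1 j h hp ih =>
    rw [List.drop_eq_getElem_cons h, List.takeWhile_cons, ih, decide_eq_true hp]
    simp only [if_pos, List.length_cons]
    omega
  | case2 j h hp =>
    rw [List.drop_eq_getElem_cons h, List.takeWhile_cons, decide_eq_false hp]
    simp
  | case3 j h =>
    rw [List.drop_eq_nil_of_le (by omega)]
    simp

theorem abuild (cs : List Char) : ∀ (i : Nat),
    altBuild cs i = (runsOf (cs.drop i)).map pyIntDigits := by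
  intro i
  fun_induction altBuild with
  | case1 i h j ih =>
    rw [List.drop_eq_getElem_cons h]
    rw [runsOf]
    have hj : j = (i + 1) + ((cs.drop (i + 1)).takeWhile
        (fun d => PySem.Int.mod (pyIntDigits [d]) 2 = PySem.Int.mod (pyIntDigits [cs[i]]) 2)).length :=
      ascan cs _ (i + 1)
    have hslice : PySem.List.slice cs (some (i : Int)) (some (j : Int))
        = cs[i] :: (cs.drop (i + 1)).takeWhile
            (fun d => PySem.Int.mod (pyIntDigits [d]) 2 = PySem.Int.mod (pyIntDigits [cs[i]]) 2) := by
      rw [PySem.List.slice_natCast, hj]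
      have : (i + 1) + ((cs.drop (i + 1)).takeWhile
          (fun d => PySem.Int.mod (pyIntDigits [d]) 2 = PySem.Int.mod (pyIntDigits [cs[i]]) 2)).length - i
          = ((cs.drop (i + 1)).takeWhile
          (fun d => PySem.Int.mod (pyIntDigits [d]) 2 = PySem.Int.mod (pyIntDigits [cs[i]]) 2)).length + 1 := by
        omega
      rw [this, List.drop_eq_getElem_cons h, List.take_succ_cons, take_len_takeWhile]
    have hdrop : cs.drop j = (cs.drop (i + 1)).dropWhile
        (fun d => PySem.Int.mod (pyIntDigits [d]) 2 = PySem.Int.mod (pyIntDigits [cs[i]]) 2) := by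
      rw [hj, ← List.drop_drop, drop_len_takeWhile]
    rw [hslice, ih, hdrop]
    simp
  | case2 i h =>
    rw [List.drop_eq_nil_of_le (by omega)]
    simp [runsOf]

-- ===== VERDICT (by name: the statement is the Claim_ definition above) =====
theorem split_odd_and_even_spec : Claim_equal_split_odd_and_even := by
  intro n _ _
  unfold Spec_split_odd_and_even split_odd_and_even split_odd_and_even_alt
  rw [mainA, abuild]
  simp
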